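-- pv_equiv track=rewrite | github.com/georgia-tech-db/TokenSmith | src/llm_benchmark_generation/review_tool.py | extract_pages
-- ===== SOURCE A (Python) =====
-- def extract_pages(full_md: str, offsets: dict[int, int], start: int, end: int) -> str:
--     if start not in offsets:
--         return ""
--     begin    = offsets[start]
--     max_page = max(offsets.keys()) if offsets else 0
--     next_page = end + 1
--     while next_page <= max_page and next_page not in offsets:
--         next_page += 1
--     end_char = offsets.get(next_page, len(full_md))
--     return full_md[begin:end_char]
-- ===== SOURCE B (Python) =====
-- def extract_pages(full_md: str, offsets: dict[int, int], start: int, end: int) -> str: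
--     if start not in offsets:
--         return ""
--     begin = offsets[start]
--     later = [k for k in offsets if k > end]
--     end_char = offsets[min(later)] if later else len(full_md)
--     return full_md[begin:end_char]
-- ===== Notes on version B (the rewrite author's own statement) =====
-- stated objective: simpler
-- what changed: Replaces the max-key bookkeeping and the integer-by-integer while-loop scan from end+1 up to max(offsets) with a single pass over the dict's keys: take the minimum key greater than end (if any) and use its offset, else len(full_md).
import Mathlib
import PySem

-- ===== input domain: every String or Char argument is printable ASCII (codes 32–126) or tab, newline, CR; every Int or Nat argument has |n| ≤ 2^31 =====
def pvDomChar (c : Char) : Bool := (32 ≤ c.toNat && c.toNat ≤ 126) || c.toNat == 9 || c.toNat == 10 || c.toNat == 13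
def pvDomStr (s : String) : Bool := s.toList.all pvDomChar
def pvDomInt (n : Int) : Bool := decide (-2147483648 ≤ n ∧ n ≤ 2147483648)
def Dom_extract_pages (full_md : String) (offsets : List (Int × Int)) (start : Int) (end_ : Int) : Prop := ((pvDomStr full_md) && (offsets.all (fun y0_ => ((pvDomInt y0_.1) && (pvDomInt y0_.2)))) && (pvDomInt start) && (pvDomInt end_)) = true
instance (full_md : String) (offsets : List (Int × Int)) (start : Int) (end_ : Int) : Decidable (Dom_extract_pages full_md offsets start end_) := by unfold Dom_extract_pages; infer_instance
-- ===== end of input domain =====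

-- B replaces A's while-loop scan over the integers end+1..max(offsets) with a single
-- filtered minimum over the dict's keys (objective: simpler).

-- ===== PORT A =====
-- the while loop: `while next_page <= max_page and next_page not in offsets: next_page += 1`
def pvScanA (offsets : List (Int × Int)) (max_page : Int) (next_page : Int) : Int :=
  if h : next_page ≤ max_page ∧ ¬ ((PySem.Dict.mk offsets).contains next_page = true) then
    pvScanA offsets max_page (next_page + 1)
  else
    next_page
termination_by (max_page + 1 - next_page).toNat
decreasing_by omega

def extract_pages (full_md : String) (offsets : List (Int × Int)) (start : Int) (end_ : Int) : String :=
  let d := PySem.Dict.mk offsets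
  if ¬ d.contains start then ""
  else
    let begin_ := (d.get? start).getD 0      -- offsets[start]; KeyError impossible under the guard
    -- `max(offsets.keys()) if offsets else 0` (max on a nonempty list; .getD 0 is unreachable)
    let max_page := if offsets.isEmpty then 0 else (PySem.List.max? d.keys (fun k => k)).getD 0
    let next_page := pvScanA offsets max_page (end_ + 1)
    let end_char := (d.get? next_page).getD (PySem.Str.len full_md)
    PySem.Str.slice full_md (some begin_) (some end_char)

-- ===== PORT B =====
def extract_pages_alt (full_md : String) (offsets : List (Int × Int)) (start : Int) (end_ : Int) : String :=
  let d := PySem.Dict.mk offsets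
  if ¬ d.contains start then ""
  else
    let begin_ := (d.get? start).getD 0      -- offsets[start]; KeyError impossible under the guard
    let later := d.keys.filter (fun k => end_ < k)
    let end_char :=
      match PySem.List.min? later (fun k => k) with
      | some m => (d.get? m).getD 0          -- offsets[min(later)]; KeyError impossible: m is a key
      | none => PySem.Str.len full_md
    PySem.Str.slice full_md (some begin_) (some end_char)

-- ===== PRECONDITION & SPEC =====
def Spec_extract_pages (full_md : String) (offsets : List (Int × Int)) (start : Int) (end_ : Int) (out : String) : Prop := out = extract_pages_alt full_md offsets start end_
instance (full_md : String) (offsets : List (Int × Int)) (start : Int) (end_ : Int) (out : String) : Decidable (Spec_extract_pages full_md offsets start end_ out) := by unfold Spec_extract_pages; infer_instance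

-- ===== CLAIM (what is proved, stated in full; the proofs are below) =====
def Claim_equal_extract_pages : Prop := ∀ (full_md : String) (offsets : List (Int × Int)) (start : Int) (end_ : Int), Dom_extract_pages full_md offsets start end_ → Spec_extract_pages full_md offsets start end_ (extract_pages full_md offsets start end_)

-- ===== LEMMAS AND PROOFS =====

theorem pv_isSome_get?_mk (ps : List (Int × Int)) (k : Int) :
    ((PySem.Dict.mk ps).get? k).isSome = (PySem.Dict.mk ps).contains k := by
  induction ps with
  | nil => rfl
  | cons p t ih =>
    obtain ⟨a, b⟩ := p
    rw [PySem.Dict.get?_mk_cons, PySem.Dict.contains_mk]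
    by_cases h : (a == k) = true
    · simp [h]
    · rw [Bool.not_eq_true] at h
      simp [h, ih, PySem.Dict.contains_mk]

theorem pv_contains_mk_iff (ps : List (Int × Int)) (k : Int) :
    (PySem.Dict.mk ps).contains k = true ↔ k ∈ ps.map Prod.fst := by
  rw [PySem.Dict.contains_mk]
  simp [List.any_eq_true, List.mem_map]

theorem pv_get?_eq_none_of_not_contains (ps : List (Int × Int)) (k : Int)
    (h : ¬ (PySem.Dict.mk ps).contains k = true) :
    (PySem.Dict.mk ps).get? k = none := by
  have h2 := pv_isSome_get?_mk ps k
  rw [Bool.not_eq_true] at h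
  rw [h] at h2
  cases hg : (PySem.Dict.mk ps).get? k with
  | none => rfl
  | some v => rw [hg] at h2; simp at h2

-- the scan from A equals the filtered minimum from B, at the level of the final lookup
theorem pv_scan_get (offsets : List (Int × Int)) (max_page : Int)
    (hmax : ∀ k ∈ offsets.map Prod.fst, k ≤ max_page) (np : Int) :
    (PySem.Dict.mk offsets).get? (pvScanA offsets max_page np) =
      (match PySem.List.min? ((offsets.map Prod.fst).filter (fun k => np ≤ k)) (fun k => k) with
       | some m => (PySem.Dict.mk offsets).get? m
       | none => none) := by
  unfold pvScanA
  split
  case isTrue h =>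
    have hfe : (offsets.map Prod.fst).filter (fun k => decide (np ≤ k)) =
        (offsets.map Prod.fst).filter (fun k => decide (np + 1 ≤ k)) := by
      apply List.filter_congr
      intro k hk
      have hne : k ≠ np := by
        intro he; subst he; exact h.2 ((pv_contains_mk_iff offsets k).2 hk)
      simp only [decide_eq_decide]
      omega
    rw [pv_scan_get offsets max_page hmax (np + 1)]
    simp only [hfe]
  case isFalse h =>
    by_cases hc : (PySem.Dict.mk offsets).contains np = true
    · have hmem : np ∈ (offsets.map Prod.fst).filter (fun k => decide (np ≤ k)) := by
        rw [List.mem_filter]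
        exact ⟨(pv_contains_mk_iff offsets np).1 hc, by simp⟩
      cases hm : PySem.List.min? ((offsets.map Prod.fst).filter (fun k => decide (np ≤ k))) (fun k => k) with
      | none =>
        rw [PySem.List.min?_eq_none_iff] at hm
        rw [hm] at hmem; simp at hmem
      | some m =>
        have h1 := PySem.List.min?_isMin hm np hmem
        have h2 := List.mem_filter.1 (PySem.List.min?_mem hm)
        have : m = np := le_antisymm h1 (by simpa using h2.2)
        rw [this]
    · have hgt : max_page < np := by
        rcases not_and_or.1 h with h1 | h1
        · omega
        · exact absurd (not_not.1 h1) hc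
      have hfil : (offsets.map Prod.fst).filter (fun k => decide (np ≤ k)) = [] := by
        rw [List.filter_eq_nil_iff]
        intro k hk
        have := hmax k hk
        simp only [decide_eq_true_eq]
        omega
      rw [hfil]
      simp only [PySem.List.min?]
      exact pv_get?_eq_none_of_not_contains offsets np hc
termination_by (max_page + 1 - np).toNat
decreasing_by omega

-- ===== VERDICT (by name: the statement is the Claim_ definition above) =====
theorem extract_pages_spec : Claim_equal_extract_pages := by
  unfold Claim_equal_extract_pages
  intro full_md offsets start end_ _
  unfold Spec_extract_pages extract_pages extract_pages_alt
  by_cases hc : (PySem.Dict.mk offsets).contains start = true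
  · simp only [hc, not_true, if_false]
    -- both guards pass
    have hne : offsets ≠ [] := by
      intro he; subst he
      rw [pv_contains_mk_iff] at hc; simp at hc
    have hEmpty : offsets.isEmpty = false := by
      cases offsets with
      | nil => exact absurd rfl hne
      | cons p t => rfl
    -- max_page is the maximum of the keys
    have hkeys : (PySem.Dict.mk offsets).keys = offsets.map Prod.fst := PySem.Dict.keys_mk offsets
    cases hM : PySem.List.max? ((PySem.Dict.mk offsets).keys) (fun k => k) with
    | none =>
      rw [PySem.List.max?_eq_none_iff, hkeys, List.map_eq_nil_iff] at hM
      exact absurd hM hne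
    | some M =>
      have hmax : ∀ k ∈ offsets.map Prod.fst, k ≤ M := by
        intro k hk
        have := PySem.List.max?_isMax hM k (by rw [hkeys]; exact hk)
        simpa using this
      have hscan := pv_scan_get offsets M hmax (end_ + 1)
      simp only [hEmpty, Bool.false_eq_true, if_false, Option.getD_some, hkeys]
      have hfe : (offsets.map Prod.fst).filter (fun k => decide (end_ < k)) =
          (offsets.map Prod.fst).filter (fun k => decide (end_ + 1 ≤ k)) := by
        apply List.filter_congr
        intro k _
        simp only [decide_eq_decide]
        omega
      rw [hfe]
      cases hm : PySem.List.min? ((offsets.map Prod.fst).filter (fun k => decide (end_ + 1 ≤ k))) (fun k => k) with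
      | none =>
        rw [hm] at hscan
        simp only at hscan
        rw [hscan]
        rfl
      | some m =>
        rw [hm] at hscan
        simp only at hscan
        -- m is a key, so the lookup succeeds and both defaults are irrelevant
        have hmk : m ∈ offsets.map Prod.fst := (List.mem_filter.1 (PySem.List.min?_mem hm)).1
        have hcm : (PySem.Dict.mk offsets).contains m = true := (pv_contains_mk_iff offsets m).2 hmk
        have hsome := pv_isSome_get?_mk offsets m
        rw [hcm] at hsome
        cases hg : (PySem.Dict.mk offsets).get? m with
        | none => rw [hg] at hsome; simp at hsome
        | some v =>
          rw [hg] at hscan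
          have hred : (match some m with
              | some m => ((PySem.Dict.mk offsets).get? m).getD 0
              | none => PySem.Str.len full_md) = ((PySem.Dict.mk offsets).get? m).getD 0 := rfl
          rw [hscan, hred, hg]
          simp
  · simp [hc]
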